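-- pv_equiv track=rewrite | github.com/dmiyakawa/atcoder-workspace | abc023/B/main.py | solve
-- ===== SOURCE A (Python) =====
-- def solve(S) -> int:
--     if len(S) % 2 == 0:
--         return -1
--     mid = len(S) // 2
--     count = 0
--     while mid + count < len(S):
--         s = S[mid - count] + S[mid + count]
--         if (count % 3 == 0 and s == "bb"
--                 or count % 3 == 1 and s == "ac"
--                 or count % 3 == 2 and s == "ca"):
--             count += 1
--         else:
--             return -1
--     return count - 1
-- ===== SOURCE B (Python) =====
-- def solve(S) -> int:
--     if len(S) % 2 == 0:
--         return -1
--     n = (len(S) - 1) // 2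
--     expected = "b"
--     for i in range(1, n + 1):
--         if i % 3 == 1:
--             expected = "a" + expected + "c"
--         elif i % 3 == 2:
--             expected = "c" + expected + "a"
--         else:
--             expected = "b" + expected + "b"
--     return n if S == expected else -1
-- ===== Notes on version B (the rewrite author's own statement) =====
-- stated objective: simpler
-- what changed: A validates character pairs incrementally from the center outward; B constructs the full canonical valid string once and returns n after a single equality comparison with S.
import Mathlib
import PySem

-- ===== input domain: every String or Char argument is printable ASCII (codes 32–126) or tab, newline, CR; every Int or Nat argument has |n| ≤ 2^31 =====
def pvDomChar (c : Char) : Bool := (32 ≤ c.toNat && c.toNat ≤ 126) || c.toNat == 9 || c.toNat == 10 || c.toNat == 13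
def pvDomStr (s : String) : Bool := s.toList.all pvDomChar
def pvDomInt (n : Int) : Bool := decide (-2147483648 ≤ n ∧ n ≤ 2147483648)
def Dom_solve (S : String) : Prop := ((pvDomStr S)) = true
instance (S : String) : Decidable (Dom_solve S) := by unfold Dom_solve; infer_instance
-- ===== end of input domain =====

-- B changes the decomposition: it builds the canonical valid string and compares once, instead of A's center-outward pair-by-pair validation.

-- ===== PORT A =====
-- the while loop of A; state is `count`, the indices stay in range on every reachable state
def solveLoop (L : List Char) (mid : Nat) (count : Nat) : Int :=
  if _h : mid + count < L.length then
    let c1 := PySem.List.pyGetD L ((mid : Int) - (count : Int)) ' '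
    let c2 := PySem.List.pyGetD L ((mid : Int) + (count : Int)) ' '
    let s : List Char := [c1, c2]
    if (count % 3 == 0 && s == ['b','b']) ||
       (count % 3 == 1 && s == ['a','c']) ||
       (count % 3 == 2 && s == ['c','a']) then
      solveLoop L mid (count + 1)
    else
      -1
  else
    (count : Int) - 1
termination_by L.length - (mid + count)
decreasing_by omega

def solve (S : String) : Int :=
  let L := S.toList
  if L.length % 2 == 0 then -1
  else solveLoop L (L.length / 2) 0

-- ===== PORT B =====
def solve_alt (S : String) : Int :=
  let L := S.toList
  if L.length % 2 == 0 then -1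
  else
    let n := (L.length - 1) / 2
    let expected := (PySem.List.pyRange 1 ((n : Int) + 1) 1).foldl
      (fun acc i =>
        if PySem.Int.mod i 3 == 1 then 'a' :: acc ++ ['c']
        else if PySem.Int.mod i 3 == 2 then 'c' :: acc ++ ['a']
        else 'b' :: acc ++ ['b']) ['b']
    if L == expected then (n : Int) else -1

-- ===== PRECONDITION & SPEC =====
def Spec_solve (S : String) (out : Int) : Prop := out = solve_alt S
instance (S : String) (out : Int) : Decidable (Spec_solve S out) := by unfold Spec_solve; infer_instance

-- ===== CLAIM (what is proved, stated in full; the proofs are below) =====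
def Claim_equal_solve : Prop := ∀ (S : String), Dom_solve S → Spec_solve S (solve S)

-- ===== LEMMAS AND PROOFS =====

-- the character A's pattern demands on the left / right side at distance k from the center
def leftChar (k : Nat) : Char := if k % 3 == 1 then 'a' else if k % 3 == 2 then 'c' else 'b'
def rightChar (k : Nat) : Char := if k % 3 == 1 then 'c' else if k % 3 == 2 then 'a' else 'b'

-- recursive form of B's canonical string of half-width n
def build (n : Nat) : List Char :=
  match n with
  | 0 => ['b']
  | m + 1 => leftChar (m + 1) :: build m ++ [rightChar (m + 1)]

-- "the pair at distance k from center n matches A's pattern"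
def Good (L : List Char) (n k : Nat) : Prop :=
  L.getD (n - k) ' ' = leftChar k ∧ L.getD (n + k) ' ' = rightChar k

theorem build_length (n : Nat) : (build n).length = 2 * n + 1 := by
  induction n with
  | zero => rfl
  | succ m ih => simp [build, ih]; omega

theorem build_get (n j : Nat) (hj : j < 2 * n + 1) :
    (build n).getD j ' ' = if j < n then leftChar (n - j) else rightChar (j - n) := by
  induction n generalizing j with
  | zero =>
    interval_cases j
    simp [build, rightChar]
  | succ m ih =>
    match j with
    | 0 => simp [build]
    | j + 1 =>
      have hlen := build_length m
      rcases Nat.lt_or_ge j (2 * m + 1) with h | h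
      · have hstep : (build (m + 1)).getD (j + 1) ' ' = (build m).getD j ' ' := by
          simp [build, List.getD]
          rw [List.getElem?_append_left (by omega)]
        rw [hstep, ih j h]
        by_cases hc : j < m
        · have hc' : j + 1 < m + 1 := by omega
          have harg : m + 1 - (j + 1) = m - j := by omega
          simp [hc, hc', harg]
        · have hc' : ¬ (j + 1 < m + 1) := by omega
          have harg : j + 1 - (m + 1) = j - m := by omega
          simp [hc, hc', harg]
      · have hje : j = 2 * m + 1 := by omega
        subst hje
        have hstep : (build (m + 1)).getD (2 * m + 1 + 1) ' ' = rightChar (m + 1) := by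
          simp [build, List.getD]
          rw [List.getElem?_append_right (by omega)]
          simp [hlen]
        rw [hstep]
        have hnc : ¬ (2 * m + 1 + 1 < m + 1) := by omega
        have harg : 2 * m + 1 + 1 - (m + 1) = m + 1 := by omega
        simp [hnc, harg]

-- A's loop returns n when every remaining pair is good
theorem loop_spec_good (L : List Char) (n : Nat) (hL : L.length = 2 * n + 1) :
    ∀ d count, count + d = n + 1 →
    (∀ k, count ≤ k → k ≤ n → Good L n k) → solveLoop L n count = (n : Int) := by
  intro d
  induction d with
  | zero =>
    intro count hc _
    rw [solveLoop]
    have hge : ¬ (n + count < L.length) := by omega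
    simp [hge]
    omega
  | succ e ih =>
    intro count hc hall
    rw [solveLoop]
    have hlt : n + count < L.length := by omega
    simp only [hlt, dif_pos]
    obtain ⟨hg1, hg2⟩ := hall count le_rfl (by omega)
    have e1 : ((n : Int) - (count : Int)) = ((n - count : Nat) : Int) := by omega
    have e2 : ((n : Int) + (count : Int)) = ((n + count : Nat) : Int) := by push_cast; ring
    rw [e1, e2, PySem.List.pyGetD_natCast, PySem.List.pyGetD_natCast, hg1, hg2]
    have hbranch : ((count % 3 == 0 && ([leftChar count, rightChar count] == ['b','b'])) ||
       (count % 3 == 1 && ([leftChar count, rightChar count] == ['a','c'])) ||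
       (count % 3 == 2 && ([leftChar count, rightChar count] == ['c','a']))) = true := by
      unfold leftChar rightChar
      have h3 : count % 3 < 3 := Nat.mod_lt _ (by omega)
      interval_cases h : count % 3 <;> simp
    rw [if_pos hbranch]
    exact ih (count + 1) (by omega) (fun k hk1 hk2 => hall k (by omega) hk2)

-- A's loop returns -1 when some remaining pair is bad
theorem loop_spec_bad (L : List Char) (n : Nat) (hL : L.length = 2 * n + 1) :
    ∀ d count, count + d = n + 1 →
    (∃ k, count ≤ k ∧ k ≤ n ∧ ¬ Good L n k) → solveLoop L n count = -1 := by
  intro d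
  induction d with
  | zero =>
    intro count hc ⟨k, hk1, hk2, _⟩
    omega
  | succ e ih =>
    intro count hc ⟨k, hk1, hk2, hkbad⟩
    rw [solveLoop]
    have hlt : n + count < L.length := by omega
    simp only [hlt, dif_pos]
    have e1 : ((n : Int) - (count : Int)) = ((n - count : Nat) : Int) := by omega
    have e2 : ((n : Int) + (count : Int)) = ((n + count : Nat) : Int) := by push_cast; ring
    rw [e1, e2, PySem.List.pyGetD_natCast, PySem.List.pyGetD_natCast]
    by_cases hgc : Good L n count
    · obtain ⟨hg1, hg2⟩ := hgc
      rw [hg1, hg2]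
      have hbranch : ((count % 3 == 0 && ([leftChar count, rightChar count] == ['b','b'])) ||
         (count % 3 == 1 && ([leftChar count, rightChar count] == ['a','c'])) ||
         (count % 3 == 2 && ([leftChar count, rightChar count] == ['c','a']))) = true := by
        unfold leftChar rightChar
        have h3 : count % 3 < 3 := Nat.mod_lt _ (by omega)
        interval_cases h : count % 3 <;> simp
      rw [if_pos hbranch]
      have hkc : count ≠ k := fun h => hkbad (h ▸ ⟨hg1, hg2⟩)
      exact ih (count + 1) (by omega) ⟨k, by omega, hk2, hkbad⟩
    · -- the pair at `count` itself fails the test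
      have hbranch : ¬ (((count % 3 == 0 && ([L.getD (n - count) ' ', L.getD (n + count) ' '] == ['b','b'])) ||
         (count % 3 == 1 && ([L.getD (n - count) ' ', L.getD (n + count) ' '] == ['a','c'])) ||
         (count % 3 == 2 && ([L.getD (n - count) ' ', L.getD (n + count) ' '] == ['c','a']))) = true) := by
        intro hb
        apply hgc
        unfold Good leftChar rightChar
        have h3 : count % 3 < 3 := Nat.mod_lt _ (by omega)
        interval_cases h : count % 3 <;> simp_all
      rw [if_neg hbranch]

-- B's foldl form of the canonical string equals the recursive `build`
theorem expected_eq_build (n : Nat) :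
    (PySem.List.pyRange 1 ((n : Int) + 1) 1).foldl
      (fun acc i =>
        if PySem.Int.mod i 3 == 1 then 'a' :: acc ++ ['c']
        else if PySem.Int.mod i 3 == 2 then 'c' :: acc ++ ['a']
        else 'b' :: acc ++ ['b']) ['b'] = build n := by
  induction n with
  | zero => rw [PySem.List.pyRange_one_eq_nil (by omega)]; rfl
  | succ m ih =>
    have hsplit : PySem.List.pyRange 1 ((m : Int) + 1 + 1) 1
        = PySem.List.pyRange 1 ((m : Int) + 1) 1 ++ [(m : Int) + 1] :=
      PySem.List.pyRange_one_succ_right (by omega)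
    have hm : PySem.Int.mod ((m : Int) + 1) 3 = (((m + 1) % 3 : Nat) : Int) := by
      exact_mod_cast PySem.Int.mod_natCast (m + 1) 3
    push_cast
    rw [hsplit, List.foldl_append, ih]
    simp only [List.foldl_cons, List.foldl_nil, hm]
    by_cases h1 : (m + 1) % 3 = 1
    · simp [build, leftChar, rightChar, h1]
    · by_cases h2 : (m + 1) % 3 = 2
      · simp [build, leftChar, rightChar, h2]
      · have hi1 : ¬ ((m : Int) + 1) % 3 = 1 := by omega
        have hi2 : ¬ ((m : Int) + 1) % 3 = 2 := by omega
        simp [build, leftChar, rightChar, h1, h2, hi1, hi2]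

-- L equals the canonical string iff every pair is good
theorem eq_build_iff (L : List Char) (n : Nat) (hL : L.length = 2 * n + 1) :
    L = build n ↔ ∀ k, k ≤ n → Good L n k := by
  constructor
  · intro hEq k hk
    subst hEq
    constructor
    · rw [build_get n (n - k) (by omega)]
      by_cases h0 : k = 0
      · subst h0; simp [leftChar, rightChar]
      · have hlt : n - k < n := by omega
        have harg : n - (n - k) = k := by omega
        simp [hlt, harg]
    · rw [build_get n (n + k) (by omega)]
      have hnc : ¬ (n + k < n) := by omega
      have harg : n + k - n = k := by omega
      simp [hnc, harg]
  · intro hall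
    have hlen := build_length n
    apply List.ext_getElem (by omega)
    intro j hj1 hj2
    have hgd : L[j] = L.getD j ' ' := (List.getD_eq_getElem L ' ' hj1).symm
    have hgd2 : (build n)[j] = (build n).getD j ' ' := (List.getD_eq_getElem _ ' ' hj2).symm
    rw [hgd, hgd2, build_get n j (by omega)]
    by_cases hc : j < n
    · obtain ⟨h1, _⟩ := hall (n - j) (by omega)
      have harg : n - (n - j) = j := by omega
      rw [harg] at h1
      rw [if_pos hc]
      exact h1
    · obtain ⟨_, h2⟩ := hall (j - n) (by omega)
      have harg : n + (j - n) = j := by omega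
      rw [harg] at h2
      rw [if_neg hc]
      exact h2

-- ===== VERDICT (by name: the statement is the Claim_ definition above) =====
theorem solve_spec : Claim_equal_solve := by
  intro S _
  unfold Spec_solve solve solve_alt
  by_cases hev : S.toList.length % 2 = 0
  · have hb : (S.toList.length % 2 == 0) = true := beq_iff_eq.mpr hev
    simp only [hb, if_true]
  · have hb : (S.toList.length % 2 == 0) = false := by simpa using hev
    simp only [hb, Bool.false_eq_true, if_false]
    obtain ⟨n, hn⟩ : ∃ n, S.toList.length = 2 * n + 1 :=
      ⟨S.toList.length / 2, by omega⟩
    have hmid : S.toList.length / 2 = n := by omega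
    have hhalf : (S.toList.length - 1) / 2 = n := by omega
    rw [hmid, hhalf, expected_eq_build n]
    by_cases hall : ∀ k, k ≤ n → Good S.toList n k
    · rw [loop_spec_good S.toList n hn (n + 1) 0 (by omega) (fun k _ hk2 => hall k hk2)]
      have heq : (S.toList == build n) = true :=
        beq_iff_eq.mpr ((eq_build_iff S.toList n hn).mpr hall)
      rw [heq, if_pos rfl]
    · simp only [not_forall] at hall
      obtain ⟨k, hk1, hk2⟩ := hall
      rw [loop_spec_bad S.toList n hn (n + 1) 0 (by omega) ⟨k, Nat.zero_le k, hk1, hk2⟩]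
      have hne : (S.toList == build n) = false := by
        simp only [beq_eq_false_iff_ne, ne_eq]
        intro h
        exact hk2 ((eq_build_iff S.toList n hn).mp h k hk1)
      rw [hne]
      simp
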